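-- pv_equiv track=rewrite | github.com/FatemehRafiee1/JobScraping | job_scraper.py | split_at_punctuation
-- ===== SOURCE A (Python) =====
-- def find_nearest_punctuation_index(text, index):
--     punctuations = {'.', ',', ';', ':', '!', '?'}
--
--     # Search left for the nearest punctuation
--     for i in range(index, -1, -1):
--         if text[i] in punctuations:
--             return i
--
--     # Search right for the nearest punctuation
--     for i in range(index, len(text)):
--         if text[i] in punctuations:
--             return i
--
--     # If no punctuation found, return the original index
--     return index
--
-- def split_at_punctuation(long_string):
--     length = len(long_string)
--     part_length = length // 3
--
--     # Find the index to split each part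
--     split_points = [part_length, 2 * part_length]
--     for i in range(len(split_points)):
--         split_points[i] = find_nearest_punctuation_index(long_string, split_points[i])
--
--     # Split the string at the found indices
--     part1 = long_string[:split_points[0]]
--     part2 = long_string[split_points[0]:split_points[1]]
--     part3 = long_string[split_points[1]:]
--
--     return part1, part2, part3
-- ===== SOURCE B (Python) =====
-- # B: build the sorted list of punctuation positions once, then answer each
-- # "nearest punctuation" query by a lookup in that list (largest <= idx, else
-- # smallest, else idx) instead of scanning the string character by character.
-- PUNCT = {'.', ',', ';', ':', '!', '?'}
--
-- def split_at_punctuation(long_string):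
--     positions = [i for i, c in enumerate(long_string) if c in PUNCT]
--
--     def nearest(idx):
--         left = [p for p in positions if p <= idx]
--         if left:
--             return left[-1]
--         if positions:
--             return positions[0]
--         return idx
--
--     n = len(long_string)
--     a = nearest(n // 3)
--     b = nearest(2 * (n // 3))
--     return long_string[:a], long_string[a:b], long_string[b:]
-- ===== Notes on version B (the rewrite author's own statement) =====
-- stated objective: alternative
-- what changed: B precomputes the sorted list of punctuation positions in one pass and answers each nearest-punctuation query by a lookup in that list (last position <= idx, else first position, else idx) instead of A's per-query left and right character scans over the string.
-- outside the precondition, e.g. on split_at_punctuation(''): A raises IndexError, B returns ('', '', '')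
-- crash fix: On the empty string A raises IndexError (text[0] in the left scan) while B returns ('', '', ''). — e.g. on split_at_punctuation(""): A raises IndexError, B returns ("", "", "")
import Mathlib
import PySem

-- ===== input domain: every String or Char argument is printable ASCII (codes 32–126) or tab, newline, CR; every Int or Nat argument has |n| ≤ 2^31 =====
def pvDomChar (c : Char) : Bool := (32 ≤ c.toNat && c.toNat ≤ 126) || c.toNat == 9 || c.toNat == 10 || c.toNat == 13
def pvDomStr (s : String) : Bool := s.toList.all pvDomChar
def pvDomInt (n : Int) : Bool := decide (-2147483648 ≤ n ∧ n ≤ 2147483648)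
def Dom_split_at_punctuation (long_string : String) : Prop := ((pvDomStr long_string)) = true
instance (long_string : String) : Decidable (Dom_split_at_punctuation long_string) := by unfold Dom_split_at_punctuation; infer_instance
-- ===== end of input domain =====

-- B builds the list of punctuation positions once and answers each nearest-punctuation
-- query by a lookup in that list (objective: alternative decomposition; return value only).

-- ===== PORT A =====
def pvPunct : List Char := ['.', ',', ';', ':', '!', '?']

-- A's left scan: for i in range(index, -1, -1): if text[i] in punctuations: return i
-- (text[i] is in range for every visited i whenever index < len(text), i.e. on Pre_; getD is exact there)
def pvScanLeft (cs : List Char) : Nat → Option Nat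
  | 0 => if cs.getD 0 ' ' ∈ pvPunct then some 0 else none
  | i+1 => if cs.getD (i+1) ' ' ∈ pvPunct then some (i+1) else pvScanLeft cs i

-- A's right scan: for i in range(index, len(text)): if text[i] in punctuations: return i
def pvScanRight (cs : List Char) (i : Nat) : Option Nat :=
  if h : i < cs.length then
    if cs.getD i ' ' ∈ pvPunct then some i else pvScanRight cs (i+1)
  else none
  termination_by cs.length - i

def find_nearest_punctuation_index (cs : List Char) (index : Nat) : Nat :=
  match pvScanLeft cs index with
  | some i => i
  | none =>
    match pvScanRight cs index with
    | some i => i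
    | none => index

def split_at_punctuation (long_string : String) : String × String × String :=
  let cs := long_string.toList
  let length := cs.length
  let part_length := length / 3
  let p1 := find_nearest_punctuation_index cs part_length
  let p2 := find_nearest_punctuation_index cs (2 * part_length)
  -- Python slices s[:p1], s[p1:p2], s[p2:] with 0 ≤ p1, p2: take/drop is exact
  (String.ofList (cs.take p1), String.ofList ((cs.take p2).drop p1), String.ofList (cs.drop p2))

-- ===== PORT B =====
def pvPunctB : List Char := ['.', ',', ';', ':', '!', '?']

-- Source B's nested helper `nearest`: last punctuation position ≤ idx, else first one, else idx
def pvNearestB (positions : List Nat) (idx : Nat) : Nat :=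
  match (positions.filter (fun p => p ≤ idx)).getLast? with
  | some p => p
  | none =>
    match positions.head? with
    | some p => p
    | none => idx

def split_at_punctuation_alt (long_string : String) : String × String × String :=
  let cs := long_string.toList
  -- [i for i, c in enumerate(long_string) if c in PUNCT]
  let positions := ((cs.zipIdx).filter (fun p => p.1 ∈ pvPunctB)).map (·.2)
  let n := cs.length
  let a := pvNearestB positions (n / 3)
  let b := pvNearestB positions (2 * (n / 3))
  (String.ofList (cs.take a), String.ofList ((cs.take b).drop a), String.ofList (cs.drop b))

-- ===== PRECONDITION & SPEC =====
-- Pre_ excludes only the empty string, on which A raises IndexError (text[0] in the left scan).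
def Pre_split_at_punctuation (long_string : String) : Prop := long_string ≠ ""
instance (long_string : String) : Decidable (Pre_split_at_punctuation long_string) := by unfold Pre_split_at_punctuation; infer_instance
def pvWitness_split_at_punctuation : String := "ab.cd"

-- On the empty string A raises IndexError while B returns ("", "", "").
def Raises_split_at_punctuation (long_string : String) : Prop := long_string = ""
instance (long_string : String) : Decidable (Raises_split_at_punctuation long_string) := by unfold Raises_split_at_punctuation; infer_instance
def pvRaiseWitness_split_at_punctuation : String := ""
def pvRaiseWitnessOut_split_at_punctuation : String × String × String := ("", "", "")

def Spec_split_at_punctuation (long_string : String) (out : String × String × String) : Prop := out = split_at_punctuation_alt long_string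
instance (long_string : String) (out : String × String × String) : Decidable (Spec_split_at_punctuation long_string out) := by unfold Spec_split_at_punctuation; infer_instance

-- ===== CLAIM (what is proved, stated in full; the proofs are below) =====
def Claim_equal_split_at_punctuation : Prop := ∀ (long_string : String), Dom_split_at_punctuation long_string → Pre_split_at_punctuation long_string → Spec_split_at_punctuation long_string (split_at_punctuation long_string)
def Claim_raises_split_at_punctuation : Prop := (∀ (long_string : String), Dom_split_at_punctuation long_string → Raises_split_at_punctuation long_string → ¬ Pre_split_at_punctuation long_string) ∧ (Dom_split_at_punctuation (pvRaiseWitness_split_at_punctuation) ∧ Raises_split_at_punctuation (pvRaiseWitness_split_at_punctuation) ∧ split_at_punctuation_alt (pvRaiseWitness_split_at_punctuation) = pvRaiseWitnessOut_split_at_punctuation)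

-- ===== LEMMAS AND PROOFS =====

-- the test A and B both apply at position i
def pvQ (cs : List Char) (i : Nat) : Bool := decide (cs.getD i ' ' ∈ pvPunct)

-- all punctuation positions, as a filtered range
def pvPos (cs : List Char) : List Nat := (List.range cs.length).filter (pvQ cs)

theorem pvZipPos (cs : List Char) (k : Nat) :
    ((cs.zipIdx k).filter (fun p => p.1 ∈ pvPunct)).map (·.2)
      = (List.range' k cs.length).filter (fun i => decide (cs.getD (i - k) ' ' ∈ pvPunct)) := by
  induction cs generalizing k with
  | nil => simp
  | cons c cs ih =>
    have h0 : (c :: cs).getD (k - k) ' ' = c := by simp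
    have hcong : (List.range' (k+1) cs.length).filter
          (fun i => decide ((c :: cs).getD (i - k) ' ' ∈ pvPunct))
        = (List.range' (k+1) cs.length).filter
          (fun i => decide (cs.getD (i - (k+1)) ' ' ∈ pvPunct)) := by
      apply List.filter_congr
      intro x hx
      have hk : k + 1 ≤ x := (List.mem_range'_1.mp hx).1
      have hxk : x - k = (x - (k+1)) + 1 := by omega
      rw [hxk]
      rfl
    rw [List.zipIdx_cons, show (c :: cs).length = cs.length + 1 from rfl,
      List.range'_succ, List.filter_cons, List.filter_cons, h0, hcong]
    by_cases hc : c ∈ pvPunct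
    · rw [if_pos (show decide ((c, k).1 ∈ pvPunct) = true from decide_eq_true hc),
        if_pos (decide_eq_true hc), List.map_cons, ih (k+1)]
    · rw [if_neg (show ¬ decide ((c, k).1 ∈ pvPunct) = true from by
          simpa using hc),
        if_neg (by simpa using hc), ih (k+1)]

theorem pvPositionsEq (cs : List Char) :
    ((cs.zipIdx).filter (fun p => p.1 ∈ pvPunctB)).map (·.2) = pvPos cs := by
  have h := pvZipPos cs 0
  rw [show pvPunctB = pvPunct from rfl]
  simpa [pvPos, pvQ, List.range_eq_range'] using h

theorem pvRangeFilterLe (idx n : Nat) :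
    (List.range n).filter (fun i => decide (i ≤ idx)) = List.range (min n (idx+1)) := by
  induction n with
  | zero => simp
  | succ m ih =>
    rw [List.range_succ, List.filter_append, ih]
    by_cases h : m ≤ idx
    · have h1 : min (m+1) (idx+1) = min m (idx+1) + 1 := by omega
      have h2 : min m (idx+1) = m := by omega
      rw [h1, List.range_succ, h2]
      simp [h]
    · have h1 : min (m+1) (idx+1) = min m (idx+1) := by omega
      rw [h1]
      simp [h]

theorem pvScanLeftEq (cs : List Char) (idx : Nat) :
    pvScanLeft cs idx = ((List.range (idx+1)).filter (pvQ cs)).getLast? := by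
  induction idx with
  | zero =>
    rw [show List.range (0+1) = [0] from rfl, List.filter_cons, List.filter_nil]
    by_cases h : cs.getD 0 ' ' ∈ pvPunct
    · rw [show pvScanLeft cs 0 = some 0 from by unfold pvScanLeft; rw [if_pos h],
        show pvQ cs 0 = true from decide_eq_true h]
      rfl
    · rw [show pvScanLeft cs 0 = none from by unfold pvScanLeft; rw [if_neg h],
        show pvQ cs 0 = false from decide_eq_false h]
      rfl
  | succ i ih =>
    rw [show i+1+1 = (i+1)+1 from rfl, List.range_succ, List.filter_append,
      List.getLast?_append, List.filter_cons, List.filter_nil]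
    by_cases h : cs.getD (i+1) ' ' ∈ pvPunct
    · rw [show pvScanLeft cs (i+1) = some (i+1) from by unfold pvScanLeft; rw [if_pos h],
        show pvQ cs (i+1) = true from decide_eq_true h]
      rfl
    · rw [show pvScanLeft cs (i+1)
            = if cs.getD (i+1) ' ' ∈ pvPunct then some (i+1) else pvScanLeft cs i from rfl,
        if_neg h,
        show pvQ cs (i+1) = false from decide_eq_false h, ih]
      simp

theorem pvScanRightEq (cs : List Char) (i : Nat) :
    pvScanRight cs i = ((List.range' i (cs.length - i)).filter (pvQ cs)).head? := by
  rw [pvScanRight]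
  by_cases h : i < cs.length
  · rw [dif_pos h]
    have hlen : cs.length - i = (cs.length - (i+1)) + 1 := by omega
    rw [hlen, List.range'_succ, List.filter_cons]
    by_cases hq : cs.getD i ' ' ∈ pvPunct
    · rw [if_pos hq, show pvQ cs i = true from decide_eq_true hq]
      rfl
    · rw [if_neg hq, show pvQ cs i = false from decide_eq_false hq,
        pvScanRightEq cs (i+1)]
      simp
  · rw [dif_neg h]
    rw [show cs.length - i = 0 from by omega]
    rfl
  termination_by cs.length - i

-- left filter of positions = punctuation positions below idx+1 (for idx < length)
theorem pvLeftEq (cs : List Char) (idx : Nat) (h : idx < cs.length) :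
    (pvPos cs).filter (fun p => decide (p ≤ idx)) = (List.range (idx+1)).filter (pvQ cs) := by
  rw [pvPos, List.filter_comm, pvRangeFilterLe]
  rw [show min cs.length (idx+1) = idx + 1 from by omega]

theorem pvNearestEq (cs : List Char) (idx : Nat) (h : idx < cs.length) :
    find_nearest_punctuation_index cs idx = pvNearestB (pvPos cs) idx := by
  unfold find_nearest_punctuation_index pvNearestB
  rw [pvScanLeftEq, pvLeftEq cs idx h]
  cases hL : ((List.range (idx+1)).filter (pvQ cs)).getLast? with
  | some j => rfl
  | none =>
    have hnil : (List.range (idx+1)).filter (pvQ cs) = [] :=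
      List.getLast?_eq_none_iff.mp hL
    have hsplit : pvPos cs
        = ((List.range (idx+1)).filter (pvQ cs))
            ++ (List.range' (idx+1) (cs.length - (idx+1))).filter (pvQ cs) := by
      rw [pvPos, ← List.filter_append]
      congr 1
      rw [List.range_eq_range', List.range_eq_range']
      rw [show List.range' (idx+1) (cs.length - (idx+1))
            = List.range' (0 + 1 * (idx+1)) (cs.length - (idx+1)) from by norm_num]
      rw [List.range'_append]
      congr 1
      omega
    have hQidx : pvQ cs idx = false := by
      have hm := List.filter_eq_nil_iff.mp hnil idx (List.self_mem_range_succ)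
      simpa using hm
    have hright : pvScanRight cs idx
        = ((List.range' (idx+1) (cs.length - (idx+1))).filter (pvQ cs)).head? := by
      rw [pvScanRightEq]
      rw [show cs.length - idx = (cs.length - (idx+1)) + 1 from by omega]
      rw [List.range'_succ, List.filter_cons, hQidx]
      simp
    rw [hright, hsplit, hnil, List.nil_append]

-- ===== VERDICT (by name: the statement is the Claim_ definition above) =====
theorem split_at_punctuation_spec : Claim_equal_split_at_punctuation := by
  intro s _ hpre
  unfold Spec_split_at_punctuation split_at_punctuation split_at_punctuation_alt
  have hne : s.toList ≠ [] := fun hh => hpre (String.toList_eq_nil_iff.mp hh)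
  have hn : 0 < s.toList.length := List.length_pos_iff.mpr hne
  have h1 : s.toList.length / 3 < s.toList.length := by omega
  have h2 : 2 * (s.toList.length / 3) < s.toList.length := by omega
  simp only [pvPositionsEq]
  rw [pvNearestEq _ _ h1, pvNearestEq _ _ h2]

theorem split_at_punctuation_raises : Claim_raises_split_at_punctuation := by
  unfold Claim_raises_split_at_punctuation
  exact ⟨fun s _ hr hp => hp hr, by decide⟩

-- self-check: the crash region really lies outside Pre_ (uses the raises theorem's first half)
theorem pvRaisesOutsidePre_ok :
    ∀ (s : String), Dom_split_at_punctuation s → Raises_split_at_punctuation s →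
      ¬ Pre_split_at_punctuation s :=
  split_at_punctuation_raises.1
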